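-- pv_equiv track=rewrite | github.com/yudai-patronai/problembook | problems/while/decimal_to_maya/solution.py | dec2maya
-- ===== SOURCE A (Python) =====
-- def rem2maya(x):  # строит разряд
--     if x == 0:
--         return '@'
--     else:
--         return '.' * (x % 5) + '|' * (x // 5)
--
-- def dec2maya(x):
--     power = 1
--     maya = ''
--     while x != 0:
--         rem = (x // power) % 20
--         x -= rem * power
--         power *= 20
--         maya_rem = rem2maya(rem)
--         maya = maya_rem + ' ' + maya if maya else maya_rem
--     return maya
-- ===== SOURCE B (Python) =====
-- def rem2maya(x):  # same glyph-per-digit helper as the original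
--     if x == 0:
--         return '@'
--     else:
--         return '.' * (x % 5) + '|' * (x // 5)
--
-- def dec2maya(x):
--     if x == 0:
--         return ''
--     head = dec2maya(x // 20)
--     tail = rem2maya(x % 20)
--     return tail if head == '' else head + ' ' + tail
-- ===== Notes on version B (the rewrite author's own statement) =====
-- stated objective: simpler
-- what changed: Replaced the while loop that keeps a growing power-of-20 accumulator and subtracts each extracted digit out of x while prepending glyphs, by direct structural recursion on x // 20 that appends the current digit's glyph after the recursive result.
import Mathlib
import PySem

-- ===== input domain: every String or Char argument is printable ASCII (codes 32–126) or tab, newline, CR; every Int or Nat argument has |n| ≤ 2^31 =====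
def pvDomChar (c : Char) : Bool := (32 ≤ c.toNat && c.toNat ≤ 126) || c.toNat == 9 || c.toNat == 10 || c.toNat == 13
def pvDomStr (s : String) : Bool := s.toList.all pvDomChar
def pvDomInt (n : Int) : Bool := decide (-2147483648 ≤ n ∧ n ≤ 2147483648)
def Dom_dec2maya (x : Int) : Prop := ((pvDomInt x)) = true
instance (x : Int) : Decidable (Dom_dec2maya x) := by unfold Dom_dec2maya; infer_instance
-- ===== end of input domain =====

-- B replaces A's while loop (power accumulator, digits subtracted out of x, glyphs prepended
-- into maya) by direct structural recursion on x // 20; objective: simpler.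

-- ===== PORT A =====
-- helper rem2maya, identical in both Pythons; ports work on List Char (String.ofList at the top)
def rem2mayaC (x : Int) : List Char :=
  if x = 0 then ['@']
  else PySem.List.pyRepeat ['.'] (PySem.Int.mod x 5) ++ PySem.List.pyRepeat ['|'] (PySem.Int.floordiv x 5)

-- A's while loop as recursion over its state (x, power, maya).
-- The second guard only makes the recursion total: it never fires on a state reachable from a
-- call dec2maya x with x ≥ 0 (there power > 0 and power ∣ x, so x ≠ 0 → x // power ≠ 0);
-- on the excluded negative x the Python loop diverges.
def dec2mayaLoop (x power : Int) (maya : List Char) : List Char :=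
  if x = 0 then maya
  else if hg : x < 0 ∨ power ≤ 0 ∨ PySem.Int.floordiv x power = 0 then maya
  else
    let rem := PySem.Int.mod (PySem.Int.floordiv x power) 20
    let mayaRem := rem2mayaC rem
    dec2mayaLoop (x - rem * power) (power * 20)
      (if maya ≠ [] then mayaRem ++ ' ' :: maya else mayaRem)
termination_by (PySem.Int.floordiv x power).toNat
decreasing_by
  rw [not_or, not_or] at hg
  obtain ⟨hx, hp, hq⟩ := hg
  rw [not_lt] at hx; rw [not_le] at hp
  rw [PySem.Int.floordiv_eq_ediv_of_pos hp, PySem.Int.mod_eq_emod_of_pos (by norm_num : (0:Int) < 20),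
      PySem.Int.floordiv_eq_ediv_of_pos (by positivity : (0:Int) < power * 20)]
  rw [PySem.Int.floordiv_eq_ediv_of_pos hp] at hq
  have hq0 : 0 < x / power := lt_of_le_of_ne (Int.ediv_nonneg hx (le_of_lt hp)) (Ne.symm hq)
  have hr0 : 0 ≤ x % power := Int.emod_nonneg x (by omega)
  have hr1 : x % power < power := Int.emod_lt_of_pos x hp
  have hxe : x = power * (x / power) + x % power := (Int.mul_ediv_add_emod x power).symm
  have hsplit : x - x / power % 20 * power = x % power + power * 20 * (x / power / 20) := by
    rw [Int.emod_def (x / power) 20]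
    nlinarith [hxe]
  have hkey : (x - x / power % 20 * power) / (power * 20) = x / power / 20 := by
    rw [hsplit, Int.add_mul_ediv_left _ _ (by positivity : (power * 20) ≠ 0),
        Int.ediv_eq_zero_of_lt hr0 (by nlinarith)]
    ring
  rw [hkey]
  omega

-- port of A: power = 1; maya = ''; while x != 0: …
def dec2maya (x : Int) : String := String.ofList (dec2mayaLoop x 1 [])

-- ===== PORT B =====
-- recursion on x // 20; the 'x < 0' guard only makes it total (Python B's recursion does not
-- return on negative x, which Pre_ excludes)
def dec2mayaAltC (x : Int) : List Char :=
  if x = 0 then []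
  else if x < 0 then []
  else
    let head := dec2mayaAltC (PySem.Int.floordiv x 20)
    let tail := rem2mayaC (PySem.Int.mod x 20)
    if head = [] then tail else head ++ ' ' :: tail
termination_by x.toNat
decreasing_by
  rename_i h0 hneg
  rw [PySem.Int.floordiv_eq_ediv_of_pos (by norm_num : (0:Int) < 20)]
  omega

def dec2maya_alt (x : Int) : String := String.ofList (dec2mayaAltC x)

-- ===== PRECONDITION & SPEC =====
-- Pre_ excludes negative x, on which Python A's while loop diverges (and Python B's recursion
-- overflows the stack): A returns no value there.
def Pre_dec2maya (x : Int) : Prop := 0 ≤ x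
instance (x : Int) : Decidable (Pre_dec2maya x) := by unfold Pre_dec2maya; infer_instance
def pvWitness_dec2maya : Int := (7)
def Spec_dec2maya (x : Int) (out : String) : Prop := out = dec2maya_alt x
instance (x : Int) (out : String) : Decidable (Spec_dec2maya x out) := by unfold Spec_dec2maya; infer_instance

-- ===== CLAIM (what is proved, stated in full; the proofs are below) =====
def Claim_equal_dec2maya : Prop := ∀ (x : Int), Dom_dec2maya x → Pre_dec2maya x → Spec_dec2maya x (dec2maya x)

-- ===== LEMMAS AND PROOFS =====

lemma rem2mayaC_ne_nil (r : Int) (h : 0 ≤ r) : rem2mayaC r ≠ [] := by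
  unfold rem2mayaC
  split_ifs with h0
  · simp
  · rw [PySem.Int.mod_eq_emod_of_pos (by norm_num : (0:Int) < 5),
        PySem.Int.floordiv_eq_ediv_of_pos (by norm_num : (0:Int) < 5)]
    simp only [PySem.List.pyRepeat_singleton, ne_eq, List.append_eq_nil_iff,
               List.replicate_eq_nil_iff, not_and]
    omega

lemma dec2mayaAltC_ne_nil (q : Int) (h : 0 < q) : dec2mayaAltC q ≠ [] := by
  rw [dec2mayaAltC, if_neg (by omega), if_neg (by omega),
      PySem.Int.floordiv_eq_ediv_of_pos (by norm_num : (0:Int) < 20),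
      PySem.Int.mod_eq_emod_of_pos (by norm_num : (0:Int) < 20)]
  by_cases hh : dec2mayaAltC (q / 20) = []
  · simpa [hh] using rem2mayaC_ne_nil _ (Int.emod_nonneg q (by norm_num))
  · simp [hh]

lemma dec2mayaLoop_eq (n : Nat) : ∀ (q p : Int) (maya : List Char), q.toNat ≤ n → 0 < q → 0 < p →
    dec2mayaLoop (q * p) p maya =
      (if maya = [] then dec2mayaAltC q else dec2mayaAltC q ++ ' ' :: maya) := by
  induction n with
  | zero => intro q p maya hn hq hp; omega
  | succ n ih =>
    intro q p maya hn hq hp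
    have hfd : PySem.Int.floordiv (q * p) p = q := by
      rw [PySem.Int.floordiv_eq_ediv_of_pos hp]
      exact Int.mul_ediv_cancel _ (by omega)
    have hq20 : PySem.Int.floordiv q 20 = q / 20 :=
      PySem.Int.floordiv_eq_ediv_of_pos (by norm_num)
    have hm20 : PySem.Int.mod q 20 = q % 20 :=
      PySem.Int.mod_eq_emod_of_pos (by norm_num)
    have hstep : q * p - q % 20 * p = q / 20 * (p * 20) := by
      rw [Int.emod_def q 20]; ring
    have hdnn : 0 ≤ q / 20 := Int.ediv_nonneg (by omega) (by norm_num)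
    rw [dec2mayaLoop]
    rw [if_neg (by positivity), dif_neg (by rw [not_or, not_or]; refine ⟨by rw [not_lt]; positivity, by omega, by rw [hfd]; omega⟩)]
    simp only [hfd, hm20, hstep]
    -- unfold B once on q
    have hBq : dec2mayaAltC q =
        (if dec2mayaAltC (q / 20) = [] then rem2mayaC (q % 20)
         else dec2mayaAltC (q / 20) ++ ' ' :: rem2mayaC (q % 20)) := by
      rw [dec2mayaAltC, if_neg (by omega), if_neg (by omega), hq20, hm20]
    have hmr : rem2mayaC (q % 20) ≠ [] :=
      rem2mayaC_ne_nil _ (Int.emod_nonneg q (by norm_num))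
    rcases lt_or_eq_of_le hdnn with hdpos | hdzero
    · -- more digits: apply the induction hypothesis to the next state
      have hnext : (q / 20).toNat ≤ n := by omega
      rw [ih (q / 20) (p * 20) _ hnext hdpos (by positivity)]
      have hBne : dec2mayaAltC (q / 20) ≠ [] := dec2mayaAltC_ne_nil _ hdpos
      rw [hBq, if_neg hBne]
      by_cases hmy : maya = []
      · simp [hmy, hmr]
      · simp [hmy, hmr]
    · -- last digit: the next x is 0 and the loop stops
      rw [← hdzero]
      simp only [zero_mul]
      rw [dec2mayaLoop, if_pos rfl]
      have hB0 : dec2mayaAltC (q / 20) = [] := by rw [← hdzero]; rw [dec2mayaAltC]; simp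
      rw [hBq, if_pos hB0]
      by_cases hmy : maya = [] <;> simp [hmy]

-- ===== VERDICT (by name: the statement is the Claim_ definition above) =====
theorem dec2maya_spec : Claim_equal_dec2maya := by
  intro x _ hpre
  unfold Spec_dec2maya dec2maya dec2maya_alt
  rcases lt_or_eq_of_le hpre with hx | hx
  · have := dec2mayaLoop_eq x.toNat x 1 [] (le_refl _) hx (by norm_num)
    rw [mul_one] at this
    rw [this, if_pos rfl]
  · rw [← hx]
    rw [dec2mayaLoop, if_pos rfl, dec2mayaAltC, if_pos rfl]
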